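-- pv_equiv track=rewrite | github.com/superchd/python | mid_term/tshirts/tshirts.py | solution
-- ===== SOURCE A (Python) =====
-- def solution(people, tshirts):
--
--     people.sort()
--     tshirts.sort()
--     cnt = 0
--     for p in people:
--         for t in tshirts:
--             if p <= t:
--                 cnt += 1
--                 tshirts.remove(t)
--                 break
--     answer = cnt
--     return answer
-- ===== SOURCE B (Python) =====
-- def solution(people, tshirts):
--     # Two-pointer greedy over both sorted sequences (O(n log n)).
--     # Return-value equivalence only: A sorts its arguments in place and pops
--     # matched shirts out of `tshirts`; B leaves both arguments untouched.
--     ps = sorted(people)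
--     ts = sorted(tshirts)
--     cnt = 0
--     i = 0
--     j = 0
--     while i < len(ps) and j < len(ts):
--         if ps[i] <= ts[j]:
--             cnt += 1
--             i += 1
--         j += 1
--     return cnt
-- ===== Notes on version B (the rewrite author's own statement) =====
-- stated objective: faster
-- what changed: Replaced the per-person linear scan with repeated list.remove on the shirt list by a single two-pointer sweep over both sorted arrays.
import Mathlib
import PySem

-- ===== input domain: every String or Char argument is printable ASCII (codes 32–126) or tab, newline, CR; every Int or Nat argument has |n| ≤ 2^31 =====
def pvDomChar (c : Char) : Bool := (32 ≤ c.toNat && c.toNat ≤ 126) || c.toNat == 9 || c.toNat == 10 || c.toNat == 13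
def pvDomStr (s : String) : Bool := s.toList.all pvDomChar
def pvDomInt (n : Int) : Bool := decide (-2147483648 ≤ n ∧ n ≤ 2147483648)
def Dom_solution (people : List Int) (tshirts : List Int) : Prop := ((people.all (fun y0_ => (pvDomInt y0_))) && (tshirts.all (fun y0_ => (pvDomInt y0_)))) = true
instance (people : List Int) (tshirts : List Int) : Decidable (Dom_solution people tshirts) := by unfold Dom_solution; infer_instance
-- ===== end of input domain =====

-- B replaces A's quadratic scan-and-remove greedy by a two-pointer sweep over
-- both sorted lists (return value only: Python A sorts its arguments in place
-- and removes matched shirts from `tshirts`; B does not mutate its arguments).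


-- ===== PORT A =====
-- inner loop 'for t in tshirts: if p <= t: cnt += 1; tshirts.remove(t); break':
-- scan for the first t with p ≤ t, then remove its first occurrence.
-- (.getD st.2 is unreachable defensiveness: the found t is a member, so remove? is some.)
def solutionStep (st : Int × List Int) (p : Int) : Int × List Int :=
  match st.2.find? (fun t => decide (p ≤ t)) with
  | some t => (st.1 + 1, (PySem.List.remove? st.2 t).getD st.2)
  | none => st

def solution (people : List Int) (tshirts : List Int) : Int :=
  let ps := PySem.List.sorted people (fun x => x) false
  let ts := PySem.List.sorted tshirts (fun x => x) false
  (ps.foldl solutionStep (0, ts)).1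

-- ===== PORT B =====
-- the while loop with indices i, j over the two sorted arrays, as structural
-- recursion on the two lists with the counter as accumulator
def twoPtr (ps : List Int) (ts : List Int) (cnt : Int) : Int :=
  match ps, ts with
  | [], _ => cnt
  | _ :: _, [] => cnt
  | p :: ps', t :: ts' => if p ≤ t then twoPtr ps' ts' (cnt + 1) else twoPtr (p :: ps') ts' cnt

def solution_alt (people : List Int) (tshirts : List Int) : Int :=
  twoPtr (PySem.List.sorted people (fun x => x) false)
         (PySem.List.sorted tshirts (fun x => x) false) 0

-- ===== PRECONDITION & SPEC =====
def Spec_solution (people : List Int) (tshirts : List Int) (out : Int) : Prop := out = solution_alt people tshirts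
instance (people : List Int) (tshirts : List Int) (out : Int) : Decidable (Spec_solution people tshirts out) := by unfold Spec_solution; infer_instance

-- ===== CLAIM (what is proved, stated in full; the proofs are below) =====
def Claim_equal_solution : Prop := ∀ (people : List Int) (tshirts : List Int), Dom_solution people tshirts → Spec_solution people tshirts (solution people tshirts)

-- ===== LEMMAS AND PROOFS =====

theorem solutionStep_none (c : Int) (ts : List Int) (p : Int)
    (h : ts.find? (fun t => decide (p ≤ t)) = none) : solutionStep (c, ts) p = (c, ts) := by
  simp only [solutionStep]; rw [h]

theorem solutionStep_some (c : Int) (ts : List Int) (p t : Int)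
    (h : ts.find? (fun t => decide (p ≤ t)) = some t) :
    solutionStep (c, ts) p = (c + 1, (PySem.List.remove? ts t).getD ts) := by
  simp only [solutionStep]; rw [h]

-- removing a value absent from the prefix removes it from the suffix
theorem remove?_append_of_not_mem (l r : List Int) (v : Int) (h : v ∉ l) :
    PySem.List.remove? (l ++ r) v = (PySem.List.remove? r v).map (l ++ ·) := by
  induction l with
  | nil => simp [Option.map_id']
  | cons x xs ih =>
      have hx : x ≠ v := fun he => h (by simp [he])
      have hxs : v ∉ xs := fun hm => h (by simp [hm])
      rw [List.cons_append, PySem.List.remove?_cons_of_ne _ hx, ih hxs, Option.map_map]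
      rfl

-- A's fold never changes the state once the shirt list is empty
theorem foldl_step_nil (ps : List Int) (c : Int) :
    ps.foldl solutionStep (c, []) = (c, []) := by
  induction ps generalizing c with
  | nil => rfl
  | cons p ps ih =>
      rw [List.foldl_cons, solutionStep_none c [] p rfl]; exact ih c

-- shirts smaller than every remaining person are dead weight in A's fold
theorem foldl_step_skip (ps : List Int) (l r : List Int) (c : Int)
    (hl : ∀ x ∈ l, ∀ q ∈ ps, x < q) :
    (ps.foldl solutionStep (c, l ++ r)).1 = (ps.foldl solutionStep (c, r)).1 := by
  induction ps generalizing l r c with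
  | nil => rfl
  | cons p ps ih =>
      have hl' : ∀ x ∈ l, ∀ q ∈ ps, x < q := fun x hx q hq => hl x hx q (by simp [hq])
      have hlf : l.find? (fun t => decide (p ≤ t)) = none := by
        refine List.find?_eq_none.mpr (fun x hx => ?_)
        have := hl x hx p (by simp)
        simp; omega
      cases hfr : r.find? (fun t => decide (p ≤ t)) with
      | none =>
          have hfind : (l ++ r).find? (fun t => decide (p ≤ t)) = none := by
            rw [List.find?_append, hlf, hfr]; rfl
          rw [List.foldl_cons, List.foldl_cons,
              solutionStep_none c _ p hfind, solutionStep_none c r p hfr]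
          exact ih l r c hl'
      | some t =>
          have hfind : (l ++ r).find? (fun t => decide (p ≤ t)) = some t := by
            rw [List.find?_append, hlf, hfr]; rfl
          have hpt : p ≤ t := by have := List.find?_some hfr; simpa using this
          have htl : t ∉ l := fun hm => absurd (hl t hm p (by simp)) (by omega)
          have htr : t ∈ r := List.mem_of_find?_eq_some hfr
          have hrem : PySem.List.remove? r t = some (r.erase t) :=
            PySem.List.remove?_eq_some_erase r t htr
          have hremA : PySem.List.remove? (l ++ r) t = some (l ++ r.erase t) := by
            rw [remove?_append_of_not_mem l r t htl, hrem]; rfl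
          rw [List.foldl_cons, List.foldl_cons,
              solutionStep_some c _ p t hfind, solutionStep_some c r p t hfr,
              hremA, hrem]
          exact ih l (r.erase t) (c + 1) hl'

-- shirts smaller than the next (smallest) person are dead weight for B too
theorem twoPtr_skip (ps l r : List Int) (p c : Int) (hl : ∀ x ∈ l, x < p) :
    twoPtr (p :: ps) (l ++ r) c = twoPtr (p :: ps) r c := by
  induction l with
  | nil => rfl
  | cons x xs ih =>
      have hx : ¬ p ≤ x := by have := hl x (by simp); omega
      rw [List.cons_append]
      show (if p ≤ x then twoPtr ps (xs ++ r) (c + 1) else twoPtr (p :: ps) (xs ++ r) c) = _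
      rw [if_neg hx]
      exact ih (fun y hy => hl y (by simp [hy]))

-- main invariant: on sorted lists A's fold computes the two-pointer count
theorem foldl_step_eq_twoPtr (ps ts : List Int) (c : Int)
    (hps : ps.Pairwise (· ≤ ·)) (hts : ts.Pairwise (· ≤ ·)) :
    (ps.foldl solutionStep (c, ts)).1 = twoPtr ps ts c := by
  induction ps generalizing ts c with
  | nil => simp [twoPtr]
  | cons p ps ih =>
      have hps' : ps.Pairwise (· ≤ ·) := hps.tail
      have hple : ∀ q ∈ ps, p ≤ q := fun q hq => List.rel_of_pairwise_cons hps hq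
      cases hf : ts.find? (fun t => decide (p ≤ t)) with
      | none =>
          have hall : ∀ x ∈ ts, x < p := by
            intro x hx
            have := List.find?_eq_none.mp hf x hx
            simp at this; omega
          have h1 : (ps.foldl solutionStep (c, ts)).1 = c := by
            have h := foldl_step_skip ps ts [] c
              (fun x hx q hq => lt_of_lt_of_le (hall x hx) (hple q hq))
            simpa [foldl_step_nil] using h
          have h2 : twoPtr (p :: ps) ts c = c := by
            have h := twoPtr_skip ps ts [] p c hall
            simpa [twoPtr] using h
          rw [List.foldl_cons, solutionStep_none c ts p hf, h1, h2]
      | some t =>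
          obtain ⟨hpt', l, r, hts_eq, hlf⟩ := List.find?_eq_some_iff_append.mp hf
          have hpt : p ≤ t := by simpa using hpt'
          have hllt : ∀ x ∈ l, x < p := by
            intro x hx
            have := hlf x hx; simp at this; omega
          have htl : t ∉ l := fun hm => absurd (hllt t hm) (by omega)
          subst hts_eq
          have hr : r.Pairwise (· ≤ ·) := (List.pairwise_append.mp hts).2.1.tail
          have hremove : PySem.List.remove? (l ++ t :: r) t = some (l ++ r) := by
            rw [remove?_append_of_not_mem l _ t htl, PySem.List.remove?_cons_self]
            rfl
          rw [List.foldl_cons, solutionStep_some c _ p t hf, hremove]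
          have hfold : (ps.foldl solutionStep (c + 1, l ++ r)).1 =
              (ps.foldl solutionStep (c + 1, r)).1 :=
            foldl_step_skip ps l r (c + 1)
              (fun x hx q hq => lt_of_lt_of_le (hllt x hx) (hple q hq))
          have htwo : twoPtr (p :: ps) (l ++ t :: r) c = twoPtr ps r (c + 1) := by
            rw [twoPtr_skip ps l (t :: r) p c hllt]
            show (if p ≤ t then twoPtr ps r (c + 1) else twoPtr (p :: ps) r c) = _
            rw [if_pos hpt]
          rw [htwo]
          show (ps.foldl solutionStep (c + 1, l ++ r)).1 = _
          rw [hfold]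
          exact ih r (c + 1) hps' hr

-- ===== VERDICT (by name: the statement is the Claim_ definition above) =====
theorem solution_spec : Claim_equal_solution := by
  intro people tshirts _
  unfold Spec_solution solution solution_alt
  exact foldl_step_eq_twoPtr _ _ 0
    (PySem.List.sorted_pairwise people (fun x => x))
    (PySem.List.sorted_pairwise tshirts (fun x => x))
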